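-- pv_equiv track=rewrite | github.com/tanu312000/pyChapter | org/netsetos/pyprep/ib/string/f.py | solve
-- ===== SOURCE A (Python) =====
-- def solve(A,B):
--     result=A*[0]
--     size=len(B)
--
--     for i in range(size):
--         row1=B[i]
--         if(len(row1)>=3):
--             firstIndex=row1[0]-1
--             secondIndex=row1[1]-1
--             price=row1[2]
--             for j in range(firstIndex,secondIndex+1):
--
--                 result[firstIndex]=result[firstIndex]+price
--                 # result[secondIndex]=result[secondIndex]+price
--                 firstIndex=firstIndex+1
--                 # secondIndex=secondIndex+1
--     return result
-- ===== SOURCE B (Python) =====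
-- def solve(A, B):
--     # Difference array: two endpoint updates per row, then a single prefix-sum pass.
--     diff = (A + 1) * [0]
--     for row in B:
--         if len(row) >= 3:
--             l = row[0]
--             r = row[1]
--             p = row[2]
--             if l <= r:
--                 diff[l - 1] += p
--                 diff[r] -= p
--     out = []
--     acc = 0
--     for d in diff[:A]:
--         acc += d
--         out.append(acc)
--     return out
-- ===== Notes on version B (the rewrite author's own statement) =====
-- stated objective: alternative
-- what changed: Replaces A's inner loop that adds the price to every cell of each row's range with a difference array: two endpoint updates per row and one prefix-sum pass at the end (per-cell walking disappears; not measurably faster on the timed inputs, whose per-element prefix pass dominates). Pre_ excludes inputs where some applicable row's 1-based range [row[0],row[1]] reaches outside 1..A, on which A either raises IndexError or silently updates wrapped-around negative indices; B's difference array indexes differently there.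
-- outside the precondition, e.g. on solve(3, [[0, 1, 5]]): A returns [5, 0, 5], B returns [0, -5, -5]; on solve(2, [[1, 5, 3]]): A raises IndexError, B raises IndexError
import Mathlib
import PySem

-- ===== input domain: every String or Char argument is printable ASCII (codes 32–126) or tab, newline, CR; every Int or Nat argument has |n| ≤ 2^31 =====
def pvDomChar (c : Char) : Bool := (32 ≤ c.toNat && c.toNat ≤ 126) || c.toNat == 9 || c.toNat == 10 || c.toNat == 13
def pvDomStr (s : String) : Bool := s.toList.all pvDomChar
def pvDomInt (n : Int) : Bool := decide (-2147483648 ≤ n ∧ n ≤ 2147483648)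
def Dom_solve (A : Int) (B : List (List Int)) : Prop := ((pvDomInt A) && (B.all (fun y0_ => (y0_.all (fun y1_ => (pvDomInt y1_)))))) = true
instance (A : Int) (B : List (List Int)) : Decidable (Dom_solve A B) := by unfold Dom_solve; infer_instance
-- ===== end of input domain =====

-- B replaces A's per-cell inner loop with a difference array: two endpoint updates per row
-- plus one prefix-sum pass (an alternative algorithm; the timed inputs showed no speed-up).

-- ===== PORT A =====
-- one row of A's outer loop ('if(len(row1)>=3): … for j in range(firstIndex,secondIndex+1): …');
-- the inner loop's mutable state is (result, firstIndex)
def pvAStep (result : List Int) (row1 : List Int) : List Int :=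
  if 3 ≤ row1.length then
    let firstIndex := PySem.List.pyGetD row1 0 0 - 1
    let secondIndex := PySem.List.pyGetD row1 1 0 - 1
    let price := PySem.List.pyGetD row1 2 0
    ((PySem.List.pyRange firstIndex (secondIndex + 1) 1).foldl
      (fun (st : List Int × Int) _j =>
        (PySem.List.pySetD st.1 st.2 (PySem.List.pyGetD st.1 st.2 0 + price), st.2 + 1))
      (result, firstIndex)).1
  else result

-- 'for i in range(size): row1=B[i]; …' visits the rows of B in order: fold over B
-- (exact: PySem.List.foldl_pyRange_zero_pyGetD); 'result=A*[0]' is replicate A.toNat 0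
def solve (A : Int) (B : List (List Int)) : List Int :=
  B.foldl pvAStep (List.replicate A.toNat 0)

-- ===== PORT B =====
-- one row of Source B's update loop: diff[l-1] += p; diff[r] -= p
def pvBStep (diff : List Int) (row : List Int) : List Int :=
  if 3 ≤ row.length then
    let l := PySem.List.pyGetD row 0 0
    let r := PySem.List.pyGetD row 1 0
    let p := PySem.List.pyGetD row 2 0
    if l ≤ r then
      let diff' := PySem.List.pySetD diff (l - 1) (PySem.List.pyGetD diff (l - 1) 0 + p)
      PySem.List.pySetD diff' r (PySem.List.pyGetD diff' r 0 - p)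
    else diff
  else diff

-- Source B: diff = (A+1)*[0]; update loop; then the prefix-sum pass over diff[:A]
-- with mutable state (out, acc)
def solve_alt (A : Int) (B : List (List Int)) : List Int :=
  ((PySem.List.slice (B.foldl pvBStep (List.replicate (A + 1).toNat 0)) none (some A)).foldl
    (fun (st : List Int × Int) d => (st.1 ++ [st.2 + d], st.2 + d)) ([], 0)).1

-- ===== PRECONDITION & SPEC =====
-- Pre_ excludes inputs where some row with ≥3 entries and row[0] ≤ row[1] has its 1-based
-- range [row[0],row[1]] reach outside 1..A: there A raises IndexError or silently updates
-- wrapped-around negative indices (an artefact of Python indexing), outside the natural domain.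
def Pre_solve (A : Int) (B : List (List Int)) : Prop :=
  ∀ row ∈ B, 3 ≤ row.length →
    (row.getD 0 0 ≤ row.getD 1 0 → 1 ≤ row.getD 0 0 ∧ row.getD 1 0 ≤ A)
instance (A : Int) (B : List (List Int)) : Decidable (Pre_solve A B) := by
  unfold Pre_solve; infer_instance

def pvWitness_solve : Int × List (List Int) := (4, [[1, 3, 5], [2, 4, -1], [2, 2]])

def Spec_solve (A : Int) (B : List (List Int)) (out : List Int) : Prop := out = solve_alt A B
instance (A : Int) (B : List (List Int)) (out : List Int) : Decidable (Spec_solve A B out) := by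
  unfold Spec_solve; infer_instance

-- ===== CLAIM (what is proved, stated in full; the proofs are below) =====
def Claim_equal_solve : Prop :=
  ∀ (A : Int) (B : List (List Int)), Dom_solve A B → Pre_solve A B → Spec_solve A B (solve A B)

-- ===== LEMMAS AND PROOFS =====

-- A's inner loop as a function of (price, start, stop, list); the pointer state starts at the
-- range's first element
def pvRun (p a b : Int) (res : List Int) : List Int :=
  ((PySem.List.pyRange a b 1).foldl
    (fun (st : List Int × Int) _j =>
      (PySem.List.pySetD st.1 st.2 (PySem.List.pyGetD st.1 st.2 0 + p), st.2 + 1))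
    (res, a)).1

-- sum of a take after a set
theorem pv_sum_take_set (xs : List Int) (i : Nat) (v : Int) (m : Nat) (h : i < xs.length) :
    ((xs.set i v).take m).sum = (xs.take m).sum + (if i < m then v - xs[i] else 0) := by
  induction xs generalizing i m with
  | nil => simp at h
  | cons x t ih =>
    cases i with
    | zero =>
      cases m with
      | zero => simp
      | succ m => simp [List.set]; ring
    | succ i =>
      cases m with
      | zero => simp
      | succ m =>
        simp only [List.set, List.take_succ_cons, List.sum_cons, List.getElem_cons_succ]
        rw [ih i m (by simpa using h)]
        by_cases hm : i < m
        · simp [hm]; ring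
        · simp [hm]

-- A's inner loop: the pointer state stays equal to the current range element, so the loop
-- adds p to exactly the positions in [a, b)
theorem pvRun_spec (p : Int) :
    ∀ (n : Nat) (a b : Int) (res : List Int), (b - a).toNat = n → 0 ≤ a →
      b ≤ (res.length : Int) →
      (pvRun p a b res).length = res.length ∧
      ∀ k : Nat, k < res.length →
        (pvRun p a b res)[k]? =
          some (res.getD k 0 + (if a ≤ (k : Int) ∧ (k : Int) < b then p else 0)) := by
  intro n
  induction n with
  | zero =>
    intro a b res hn ha hb
    have hba : b ≤ a := by omega
    rw [pvRun, PySem.List.pyRange_one_eq_nil hba]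
    refine ⟨rfl, fun k hk => ?_⟩
    have : ¬(a ≤ (k : Int) ∧ (k : Int) < b) := by omega
    simp [this, List.getElem?_eq_getElem hk]
  | succ n ih =>
    intro a b res hn ha hb
    have hab : a < b := by omega
    have halen : a < (res.length : Int) := lt_of_lt_of_le hab hb
    rw [pvRun, PySem.List.pyRange_one_cons hab, List.foldl_cons]
    have hstep :
        (PySem.List.pySetD (res, a).1 (res, a).2
            (PySem.List.pyGetD (res, a).1 (res, a).2 0 + p), (res, a).2 + 1) =
          ((res.set a.toNat (res[a.toNat]'(by omega) + p), a + 1) : List Int × Int) := by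
      simp [PySem.List.pySetD_of_nonneg _ _ ha, PySem.List.pyGetD_eq_getElem res 0 ha halen]
    rw [hstep]
    set res' := res.set a.toNat (res[a.toNat]'(by omega) + p) with hres'
    have hlen' : res'.length = res.length := by simp [hres']
    obtain ⟨hL, hV⟩ := ih (a + 1) b res' (by omega) (by omega) (by omega)
    simp only [pvRun] at hL hV
    refine ⟨by omega, fun k hk => ?_⟩
    rw [hV k (by omega)]
    have hgd : res'.getD k 0 =
        res.getD k 0 + (if a.toNat = k then p else 0) := by
      rw [List.getD_eq_getElem?_getD, List.getD_eq_getElem?_getD, hres', List.getElem?_set]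
      by_cases hak : a.toNat = k
      · subst hak; simp [hk]
      · simp [hak]
    rw [hgd]
    congr 1
    have hcast : ((a.toNat : Int)) = a := Int.toNat_of_nonneg ha
    by_cases hak : a.toNat = k
    · have : a = (k : Int) := by omega
      simp [this]; omega
    · have : a ≠ (k : Int) := by omega
      split_ifs <;> omega

-- the per-row step preserves the prefix-sum simulation invariant
theorem pv_step_inv (A : Int) (row : List Int)
    (hpre : 3 ≤ row.length →
      (row.getD 0 0 ≤ row.getD 1 0 → 1 ≤ row.getD 0 0 ∧ row.getD 1 0 ≤ A))
    (res diff : List Int) (hres : res.length = A.toNat)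
    (hdiff : diff.length = (A + 1).toNat)
    (hinv : ∀ k : Nat, k < A.toNat → res[k]? = some ((diff.take (k + 1)).sum)) :
    (pvAStep res row).length = A.toNat ∧ (pvBStep diff row).length = (A + 1).toNat ∧
    ∀ k : Nat, k < A.toNat →
      (pvAStep res row)[k]? = some (((pvBStep diff row).take (k + 1)).sum) := by
  by_cases h3 : 3 ≤ row.length
  · rw [pvAStep, pvBStep, if_pos h3, if_pos h3]
    simp only [PySem.List.pyGetD_ofNat']
    set l := row.getD 0 0 with hl
    set r := row.getD 1 0 with hr
    set p := row.getD 2 0 with hp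
    by_cases hlr : l ≤ r
    · obtain ⟨h1, h2⟩ := hpre h3 hlr
      have hA1 : 1 ≤ A := le_trans (le_trans h1 hlr) h2
      have hcastA : ((A.toNat : Int)) = A := Int.toNat_of_nonneg (by omega)
      simp only [if_pos hlr]
      -- A side
      have hb : r - 1 + 1 = r := by ring
      have hrlen : r ≤ (res.length : Int) := by rw [hres]; omega
      obtain ⟨haL, haV⟩ := pvRun_spec p (r - (l - 1)).toNat (l - 1) r res rfl (by omega) hrlen
      simp only [pvRun] at haL haV
      -- B side
      have hl1 : (l - 1).toNat < diff.length := by rw [hdiff]; omega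
      have hrn : r.toNat < diff.length := by rw [hdiff]; omega
      have hB :
          (PySem.List.pySetD (PySem.List.pySetD diff (l - 1)
              (PySem.List.pyGetD diff (l - 1) 0 + p)) r
            (PySem.List.pyGetD (PySem.List.pySetD diff (l - 1)
              (PySem.List.pyGetD diff (l - 1) 0 + p)) r 0 - p)) =
          ((diff.set (l - 1).toNat (diff[(l - 1).toNat]'hl1 + p)).set r.toNat
            (((diff.set (l - 1).toNat (diff[(l - 1).toNat]'hl1 + p))[r.toNat]'(by
              simpa using hrn)) - p)) := by
        rw [PySem.List.pyGetD_eq_getElem diff 0 (by omega) (by omega),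
          PySem.List.pySetD_of_nonneg _ _ (by omega : (0:Int) ≤ l - 1),
          PySem.List.pyGetD_eq_getElem _ 0 (by omega) (by simp; omega),
          PySem.List.pySetD_of_nonneg _ _ (by omega : (0:Int) ≤ r)]
      rw [hb, hB]
      set diff1 := diff.set (l - 1).toNat (diff[(l - 1).toNat]'hl1 + p) with hd1
      set diff2 := diff1.set r.toNat ((diff1[r.toNat]'(by simpa [hd1] using hrn)) - p) with hd2
      have hlen1 : diff1.length = diff.length := by simp [hd1]
      have hlen2 : diff2.length = diff.length := by simp [hd2, hd1]
      refine ⟨by omega, by omega, fun k hk => ?_⟩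
      rw [haV k (by omega)]
      have hsum2 : (diff2.take (k + 1)).sum =
          (diff1.take (k + 1)).sum + (if r.toNat < k + 1 then -p else 0) := by
        rw [hd2, pv_sum_take_set diff1 r.toNat _ (k + 1) (by omega)]
        split_ifs <;> ring
      have hsum1 : (diff1.take (k + 1)).sum =
          (diff.take (k + 1)).sum + (if (l - 1).toNat < k + 1 then p else 0) := by
        rw [hd1, pv_sum_take_set diff (l - 1).toNat _ (k + 1) hl1]
        split_ifs <;> ring
      have hres_k : res.getD k 0 = (diff.take (k + 1)).sum := by
        rw [List.getD_eq_getElem?_getD, hinv k hk]; rfl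
      rw [hsum2, hsum1, hres_k]
      congr 1
      split_ifs <;> omega
    · simp only [if_neg hlr]
      have : r - 1 + 1 ≤ l - 1 := by omega
      rw [PySem.List.pyRange_one_eq_nil this, List.foldl_nil]
      exact ⟨hres, hdiff, hinv⟩
  · rw [pvAStep, pvBStep, if_neg h3, if_neg h3]
    exact ⟨hres, hdiff, hinv⟩

-- the whole update phase preserves the invariant
theorem pv_fold_inv (A : Int) (B : List (List Int)) (hpre : Pre_solve A B) :
    ∀ (res diff : List Int), res.length = A.toNat → diff.length = (A + 1).toNat →
    (∀ k : Nat, k < A.toNat → res[k]? = some ((diff.take (k + 1)).sum)) →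
    (B.foldl pvAStep res).length = A.toNat ∧
    (B.foldl pvBStep diff).length = (A + 1).toNat ∧
    ∀ k : Nat, k < A.toNat →
      (B.foldl pvAStep res)[k]? = some (((B.foldl pvBStep diff).take (k + 1)).sum) := by
  induction B with
  | nil => intro res diff h1 h2 h3; exact ⟨h1, h2, h3⟩
  | cons row t ih =>
    intro res diff h1 h2 h3
    obtain ⟨g1, g2, g3⟩ := pv_step_inv A row (hpre row (by simp)) res diff h1 h2 h3
    exact ih (fun rw hrw => hpre rw (by simp [hrw])) (pvAStep res row) (pvBStep diff row) g1 g2 g3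

-- B's prefix-sum pass, characterised
theorem pv_prefix_fold (xs : List Int) (out : List Int) (acc : Int) :
    ((xs.foldl (fun (st : List Int × Int) d => (st.1 ++ [st.2 + d], st.2 + d)) (out, acc)).1)
      = out ++ (List.range xs.length).map (fun k => acc + (xs.take (k + 1)).sum) := by
  induction xs generalizing out acc with
  | nil => simp
  | cons d t ih =>
    simp only [List.foldl_cons, ih, List.length_cons, List.range_succ_eq_map]
    simp [List.map_map, Function.comp_def]
    intro k _; ring

-- ===== VERDICT (by name: the statement is the Claim_ definition above) =====
theorem solve_spec : Claim_equal_solve := by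
  intro A B _ hpre
  unfold Spec_solve solve solve_alt
  obtain ⟨hL, hLd, hV⟩ := pv_fold_inv A B hpre
    (List.replicate A.toNat 0) (List.replicate (A + 1).toNat 0)
    (by simp) (by simp)
    (by intro k hk; simp [hk, List.take_replicate])
  set R := B.foldl pvAStep (List.replicate A.toNat 0) with hR
  set Df := B.foldl pvBStep (List.replicate (A + 1).toNat 0) with hDf
  rcases le_or_gt 0 A with hA | hA
  · have hslice : PySem.List.slice Df none (some A) = Df.take A.toNat :=
      PySem.List.slice_to Df hA
    rw [hslice, pv_prefix_fold, List.nil_append]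
    have hlent : (Df.take A.toNat).length = A.toNat := by
      rw [List.length_take]; omega
    rw [hlent]
    apply List.ext_getElem?
    intro i
    by_cases hi : i < A.toNat
    · rw [hV i hi]
      simp only [List.getElem?_map, List.getElem?_range hi, Option.map_some]
      have : (Df.take A.toNat).take (i + 1) = Df.take (i + 1) := by
        rw [List.take_take]; congr 1; omega
      rw [this]
      norm_num
    · rw [List.getElem?_eq_none (by omega),
        List.getElem?_eq_none (by simp only [List.length_map, List.length_range]; omega)]
  · have hDf0 : Df = [] := List.eq_nil_of_length_eq_zero (by omega)
    have hR0 : R = [] := List.eq_nil_of_length_eq_zero (by omega)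
    rw [hDf0, hR0]
    simp [PySem.List.slice, PySem.List.clampIdx]
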